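-- pv_equiv track=rewrite | github.com/pranavlakshmanan/Eyrc_GG_1240 | Task_5/Task_5A/task_5A.py | sort_priority
-- ===== SOURCE A (Python) =====
-- def sort_priority(events_list):
--     priority_order = [
--         "fire",
--         "destroyed_buildings",
--         "human_aid_rehabilitation",
--         "military_vehicles",
--         "combat",
--         "empty",
--     ]
--     events_dict = {}
--     events_dict2 = {}
--
--     priority_string = ""
--     for i in range(0, len(events_list)):
--         if events_list[i] != "empty":
--             events_dict[chr(65 + i)] = events_list[i]
--             if events_list[i] == "fire":
--                 events_dict2[chr(65 + i)] = "Fire"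
--             elif events_list[i] == "destroyed_buildings":
--                 events_dict2[chr(65 + i)] = "Destroyed buildings"
--             elif events_list[i] == "human_aid_rehabilitation":
--                 events_dict2[chr(65 + i)] = "Humanitarian Aid and rehabilitation"
--             elif events_list[i] == "military_vehicles":
--                 events_dict2[chr(65 + i)] = "Military Vehicles"
--             elif events_list[i] == "combat":
--                 events_dict2[chr(65 + i)] = "Combat"
--
--     for i in priority_order:
--         for j in events_dict:
--             if i == events_dict[j]:
--                 priority_string += list(events_dict.keys())[
--                     list(events_dict.values()).index(i)
--                 ]
--                 break
--
--     return events_dict2, priority_string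
-- ===== SOURCE B (Python) =====
-- _DISPLAY = {
--     "fire": "Fire",
--     "destroyed_buildings": "Destroyed buildings",
--     "human_aid_rehabilitation": "Humanitarian Aid and rehabilitation",
--     "military_vehicles": "Military Vehicles",
--     "combat": "Combat",
-- }
-- _PRIORITY = [
--     "fire",
--     "destroyed_buildings",
--     "human_aid_rehabilitation",
--     "military_vehicles",
--     "combat",
-- ]
--
--
-- def sort_priority(events_list):
--     pairs = [(i, e) for i, e in enumerate(events_list) if e != "empty"]
--     events_dict2 = {chr(65 + i): _DISPLAY[e] for i, e in pairs if e in _DISPLAY}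
--     ranked = sorted((_PRIORITY.index(e), i) for i, e in pairs if e in _DISPLAY)
--     chars = []
--     prev = -1
--     for r, i in ranked:
--         if r != prev:
--             chars.append(chr(65 + i))
--             prev = r
--     return events_dict2, "".join(chars)
-- ===== Notes on version B (the rewrite author's own statement) =====
-- stated objective: faster
-- what changed: Replaced A's incremental dict building plus per-priority rescans of the dict (membership scan and list(keys)/list(values).index passes) by a sort-then-scan: build the non-empty known events as (priority_rank, index) tuples in one comprehension, sort them, and emit one letter per rank group in a single scan over the sorted list.
import Mathlib
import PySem

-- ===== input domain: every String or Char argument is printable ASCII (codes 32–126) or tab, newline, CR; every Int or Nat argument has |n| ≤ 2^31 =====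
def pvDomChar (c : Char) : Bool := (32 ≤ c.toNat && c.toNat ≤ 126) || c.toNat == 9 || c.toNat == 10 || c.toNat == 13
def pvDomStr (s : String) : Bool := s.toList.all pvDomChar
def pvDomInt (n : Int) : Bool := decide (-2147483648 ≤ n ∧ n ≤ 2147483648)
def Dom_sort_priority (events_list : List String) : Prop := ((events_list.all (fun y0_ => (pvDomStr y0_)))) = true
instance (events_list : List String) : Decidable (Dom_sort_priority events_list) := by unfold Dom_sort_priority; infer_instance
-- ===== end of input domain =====

-- B replaces A's per-priority rescans of the incrementally built dict (with list(...).index)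
-- by a sort-then-scan: rank the non-empty known events as (priority_rank, index) tuples, sort
-- them, and emit one letter per rank group in a single scan (objective: faster; measured).


-- ===== PORT A =====
-- chr(n), hand-ported: exact (the one-char string) for every codepoint a Lean Char can hold;
-- surrogate/overflow codepoints (reachable only for events_list longer than 55231 entries)
-- get an injective placeholder, since Lean strings cannot hold them.
def pyChr (n : Nat) : String :=
  if n.isValidChar then String.singleton (Char.ofNat n) else String.ofList (List.replicate n 'a')

-- the inner 'for j in events_dict: if i == events_dict[j]: … ; break' loop of A
def innerLoopA (d : PySem.Dict String String) (i : String) (ks : List String) : String :=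
  match ks with
  | [] => ""
  | j :: rest =>
    if i = d.getD j "" then
      match PySem.List.index? d.values i with
      | some idx => PySem.List.pyGetD d.keys (idx : Int) ""
      | none => ""          -- unreachable: the branch is taken only when i occurs among the values
    else innerLoopA d i rest

def sort_priority (events_list : List String) : (List (String × String)) × String :=
  let priority_order : List String :=
    ["fire", "destroyed_buildings", "human_aid_rehabilitation", "military_vehicles", "combat", "empty"]
  let st := (PySem.List.pyRange 0 (PySem.List.len events_list) 1).foldl
    (fun (st : PySem.Dict String String × PySem.Dict String String) i =>
      if PySem.List.pyGetD events_list i "" ≠ "empty" then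
        (st.1.insert (pyChr (65 + i).toNat) (PySem.List.pyGetD events_list i ""),
         if PySem.List.pyGetD events_list i "" = "fire" then
           st.2.insert (pyChr (65 + i).toNat) "Fire"
         else if PySem.List.pyGetD events_list i "" = "destroyed_buildings" then
           st.2.insert (pyChr (65 + i).toNat) "Destroyed buildings"
         else if PySem.List.pyGetD events_list i "" = "human_aid_rehabilitation" then
           st.2.insert (pyChr (65 + i).toNat) "Humanitarian Aid and rehabilitation"
         else if PySem.List.pyGetD events_list i "" = "military_vehicles" then
           st.2.insert (pyChr (65 + i).toNat) "Military Vehicles"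
         else if PySem.List.pyGetD events_list i "" = "combat" then
           st.2.insert (pyChr (65 + i).toNat) "Combat"
         else st.2)
      else st)
    (PySem.Dict.empty, PySem.Dict.empty)
  (st.2.items, priority_order.foldl (fun acc i => acc ++ innerLoopA st.1 i st.1.keys) "")

-- ===== PORT B =====
-- the module-level _DISPLAY dict literal of Source B (distinct keys, so the items list is the literal)
def displayB : PySem.Dict String String :=
  ⟨[("fire", "Fire"), ("destroyed_buildings", "Destroyed buildings"),
    ("human_aid_rehabilitation", "Humanitarian Aid and rehabilitation"),
    ("military_vehicles", "Military Vehicles"), ("combat", "Combat")]⟩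

-- Source B's _PRIORITY (the five known labels; no "empty" entry in B)
def priorityB : List String :=
  ["fire", "destroyed_buildings", "human_aid_rehabilitation", "military_vehicles", "combat"]

def sort_priority_alt (events_list : List String) : (List (String × String)) × String :=
  -- pairs = [(i, e) for i, e in enumerate(events_list) if e != "empty"]
  let pairs := (PySem.List.enumerate events_list).filter (fun p => p.2 != "empty")
  -- events_dict2 = {chr(65 + i): _DISPLAY[e] for i, e in pairs if e in _DISPLAY}
  -- (the 'e in _DISPLAY' guard makes _DISPLAY[e] total: get? is some there, hence getD)
  let events_dict2 := pairs.foldl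
    (fun (d : PySem.Dict String String) p =>
      if displayB.contains p.2 then
        d.insert (pyChr (65 + p.1).toNat) ((displayB.get? p.2).getD "")
      else d)
    PySem.Dict.empty
  -- ranked = sorted((_PRIORITY.index(e), i) for i, e in pairs if e in _DISPLAY)
  -- (tuple sort = sorted2 on (fst, snd); the guard makes _PRIORITY.index(e) total, hence getD)
  let ranked := PySem.List.sorted2
    ((pairs.filter (fun p => displayB.contains p.2)).map
      (fun p => ((((PySem.List.index? priorityB p.2).getD 0 : Nat) : Int), p.1)))
    Prod.fst Prod.snd false
  -- chars = []; prev = -1; for r, i in ranked: if r != prev: chars.append(chr(65+i)); prev = r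
  let fin := ranked.foldl
    (fun (st : List String × Int) q =>
      if q.1 ≠ st.2 then (st.1 ++ [pyChr (65 + q.2).toNat], q.1) else st)
    (([] : List String), (-1 : Int))
  (events_dict2.items, PySem.Str.join "" fin.1)

-- ===== PRECONDITION & SPEC =====
def Spec_sort_priority (events_list : List String) (out : (List (String × String)) × String) : Prop := out = sort_priority_alt events_list
instance (events_list : List String) (out : (List (String × String)) × String) : Decidable (Spec_sort_priority events_list out) := by unfold Spec_sort_priority; infer_instance

-- ===== CLAIM (what is proved, stated in full; the proofs are below) =====
def Claim_equal_sort_priority : Prop := ∀ (events_list : List String), Dom_sort_priority events_list → Spec_sort_priority events_list (sort_priority events_list)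

-- ===== LEMMAS AND PROOFS =====

-- ---------- basic helpers ----------
def pkey (p : Int × String) : String := pyChr (65 + p.1).toNat

lemma pyChr_inj {m n : Nat} (h : pyChr m = pyChr n) : m = n := by
  have h' := congrArg String.toList h
  unfold pyChr at h'
  have hbig : ∀ k : Nat, ¬ k.isValidChar → 55296 ≤ k := by
    intro k hk; by_contra hlt; exact hk (Or.inl (by omega))
  by_cases hm : m.isValidChar <;> by_cases hn : n.isValidChar <;>
    simp [hm, hn, String.toList_singleton] at h'
  · have := congrArg Char.toNat h'
    rwa [Char.toNat_ofNat, Char.toNat_ofNat, if_pos hm, if_pos hn] at this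
  · have := congrArg List.length h'
    simp at this
    have := hbig n hn; omega
  · have := congrArg List.length h'
    simp at this
    have := hbig m hm; omega
  · exact h'

-- all indices in enumerate are ≥ the start
lemma enum_ge (xs : List String) : ∀ (n : Int), ∀ p ∈ PySem.List.enumerate xs n, n ≤ p.1 := by
  induction xs with
  | nil => intro n p hp; simp [PySem.List.enumerate] at hp
  | cons x t ih =>
    intro n p hp
    rw [PySem.List.enumerate_cons] at hp
    rcases List.mem_cons.mp hp with rfl | hp
    · simp
    · have := ih (n + 1) p hp; omega

lemma enum_pairwise (xs : List String) (n : Int) :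
    (PySem.List.enumerate xs n).Pairwise (fun p q => p.1 < q.1) := by
  induction xs generalizing n with
  | nil => simp [PySem.List.enumerate]
  | cons x t ih =>
    rw [PySem.List.enumerate_cons]
    exact List.pairwise_cons.mpr ⟨fun q hq => by have := enum_ge t (n+1) q hq; omega, ih (n+1)⟩

-- folding fresh-key inserts appends the items in order
lemma foldl_insert_fresh {α : Type} (key val : α → String) (ps : List α) (d : PySem.Dict String String)
    (hnd : (ps.map key).Nodup) (hfresh : ∀ p ∈ ps, key p ∉ d.keys) :
    ps.foldl (fun d p => d.insert (key p) (val p)) d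
      = ⟨d.items ++ ps.map (fun p => (key p, val p))⟩ := by
  induction ps generalizing d with
  | nil => simp
  | cons p t ih =>
    have hcont : d.contains (key p) = false := by
      rw [← Bool.not_eq_true, PySem.Dict.contains_iff_mem_keys]
      exact hfresh p (by simp)
    have hins : d.insert (key p) (val p) = ⟨d.items ++ [(key p, val p)]⟩ := by
      simp [PySem.Dict.insert, hcont]
    simp only [List.foldl_cons, hins]
    rw [ih _ (by simp at hnd; exact hnd.2)]
    · simp
    · intro q hq
      show key q ∉ (d.items ++ [(key p, val p)]).map Prod.fst
      rw [List.map_append]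
      simp only [List.mem_append, List.map_cons, List.map_nil]
      rintro (h | h)
      · exact hfresh q (by simp [hq]) h
      · simp at h
        simp at hnd
        exact hnd.1 q hq h

-- the filtered enumeration both programs effectively traverse
def Pfun (xs : List String) : List (Int × String) :=
  (PySem.List.enumerate xs).filter (fun p => p.2 != "empty")

lemma Pfun_pairwise (xs : List String) : (Pfun xs).Pairwise (fun p q => p.1 < q.1) :=
  (enum_pairwise xs 0).filter _

lemma Pfun_key_nodup (xs : List String) : ((Pfun xs).map pkey).Nodup := by
  rw [List.nodup_iff_pairwise_ne, List.pairwise_map]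
  refine (Pfun_pairwise xs).imp_of_mem (fun {p q} hp hq h => ?_)
  have hp0 : 0 ≤ p.1 := enum_ge xs 0 p (List.mem_of_mem_filter hp)
  intro he
  have := pyChr_inj he
  omega

-- A's elif display chain agrees with B's membership-guarded insert
lemma display_chain (d2 : PySem.Dict String String) (k e : String) :
    (if e = "fire" then d2.insert k "Fire"
     else if e = "destroyed_buildings" then d2.insert k "Destroyed buildings"
     else if e = "human_aid_rehabilitation" then d2.insert k "Humanitarian Aid and rehabilitation"
     else if e = "military_vehicles" then d2.insert k "Military Vehicles"
     else if e = "combat" then d2.insert k "Combat"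
     else d2) =
    (if displayB.contains e then d2.insert k ((displayB.get? e).getD "") else d2) := by
  by_cases h1 : e = "fire"
  · subst h1; rfl
  by_cases h2 : e = "destroyed_buildings"
  · subst h2; rfl
  by_cases h3 : e = "human_aid_rehabilitation"
  · subst h3; rfl
  by_cases h4 : e = "military_vehicles"
  · subst h4; rfl
  by_cases h5 : e = "combat"
  · subst h5; rfl
  have hc : displayB.contains e = false := by
    have h1' : ¬ ("fire" = e) := fun h => h1 h.symm
    have h2' : ¬ ("destroyed_buildings" = e) := fun h => h2 h.symm
    have h3' : ¬ ("human_aid_rehabilitation" = e) := fun h => h3 h.symm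
    have h4' : ¬ ("military_vehicles" = e) := fun h => h4 h.symm
    have h5' : ¬ ("combat" = e) := fun h => h5 h.symm
    simp [displayB, PySem.Dict.contains, h1', h2', h3', h4', h5']
  rw [if_neg h1, if_neg h2, if_neg h3, if_neg h4, if_neg h5, hc]
  simp

-- the loop body of A's first loop, on enumerated pairs
def stepA (st : PySem.Dict String String × PySem.Dict String String) (p : Int × String) :
    PySem.Dict String String × PySem.Dict String String :=
  if p.2 ≠ "empty" then
    (st.1.insert (pkey p) p.2,
     if p.2 = "fire" then st.2.insert (pkey p) "Fire"
     else if p.2 = "destroyed_buildings" then st.2.insert (pkey p) "Destroyed buildings"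
     else if p.2 = "human_aid_rehabilitation" then st.2.insert (pkey p) "Humanitarian Aid and rehabilitation"
     else if p.2 = "military_vehicles" then st.2.insert (pkey p) "Military Vehicles"
     else if p.2 = "combat" then st.2.insert (pkey p) "Combat"
     else st.2)
  else st

-- A's dict of all non-empty events, in closed form
def dA (xs : List String) : PySem.Dict String String := ⟨(Pfun xs).map (fun p => (pkey p, p.2))⟩

-- B's events_dict2 (also what A's second accumulator computes)
def d2B (xs : List String) : PySem.Dict String String :=
  (Pfun xs).foldl
    (fun d p => if displayB.contains p.2 then d.insert (pkey p) ((displayB.get? p.2).getD "") else d)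
    PySem.Dict.empty

lemma stepA_split (st : PySem.Dict String String × PySem.Dict String String) (p : Int × String) :
    stepA st p =
      ((if p.2 ≠ "empty" then st.1.insert (pkey p) p.2 else st.1),
       (if p.2 ≠ "empty" then
          (if displayB.contains p.2 then st.2.insert (pkey p) ((displayB.get? p.2).getD "") else st.2)
        else st.2)) := by
  unfold stepA
  rw [display_chain st.2 (pkey p) p.2]
  split_ifs with h <;> simp

lemma foldA_eq (xs : List String) :
    (PySem.List.enumerate xs).foldl stepA (PySem.Dict.empty, PySem.Dict.empty)
      = (dA xs, d2B xs) := by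
  have hsplit : (PySem.List.enumerate xs).foldl stepA (PySem.Dict.empty, PySem.Dict.empty)
      = ((PySem.List.enumerate xs).foldl
           (fun d (p : Int × String) => if p.2 ≠ "empty" then d.insert (pkey p) p.2 else d) PySem.Dict.empty,
         (PySem.List.enumerate xs).foldl
           (fun d (p : Int × String) => if p.2 ≠ "empty" then
              (if displayB.contains p.2 then d.insert (pkey p) ((displayB.get? p.2).getD "") else d)
            else d) PySem.Dict.empty) := by
    rw [show stepA = (fun st (p : Int × String) =>
      ((if p.2 ≠ "empty" then st.1.insert (pkey p) p.2 else st.1),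
       (if p.2 ≠ "empty" then
          (if displayB.contains p.2 then st.2.insert (pkey p) ((displayB.get? p.2).getD "") else st.2)
        else st.2))) from funext fun st => funext fun p => stepA_split st p]
    rw [PySem.List.foldl_prod_mk
      (f := fun (d : PySem.Dict String String) (p : Int × String) => if p.2 ≠ "empty" then d.insert (pkey p) p.2 else d)
      (g := fun (d : PySem.Dict String String) (p : Int × String) => if p.2 ≠ "empty" then
          (if displayB.contains p.2 then d.insert (pkey p) ((displayB.get? p.2).getD "") else d)
        else d)]
  rw [hsplit]
  have hfilter : ∀ (g : PySem.Dict String String → (Int × String) → PySem.Dict String String),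
      (PySem.List.enumerate xs).foldl
        (fun d (p : Int × String) => if p.2 ≠ "empty" then g d p else d) PySem.Dict.empty
      = (Pfun xs).foldl g PySem.Dict.empty := by
    intro g
    rw [PySem.List.foldl_ite_eq_foldl_filter]
    unfold Pfun
    congr 1
    apply List.filter_congr
    intro p _
    cases hb : p.2 == "empty" <;> simp_all
  rw [hfilter, hfilter]
  unfold dA d2B
  congr 1
  rw [foldl_insert_fresh pkey Prod.snd _ _ (Pfun_key_nodup xs) (by intro p _ h; simp [PySem.Dict.empty, PySem.Dict.keys] at h)]
  simp [PySem.Dict.empty]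

-- ---------- lexicographic order on (rank, index) tuples (Python's tuple comparison) ----------
def lexlt (a b : Int × Int) : Prop := a.1 < b.1 ∨ (a.1 = b.1 ∧ a.2 < b.2)
def lexle (a b : Int × Int) : Prop := a.1 < b.1 ∨ (a.1 = b.1 ∧ a.2 ≤ b.2)

def befLex (a b : Int × Int) : Bool :=
  decide (a.1 < b.1) || (!decide (b.1 < a.1) && decide (a.2 < b.2))

lemma befLex_true {a b : Int × Int} (h : befLex a b = true) : lexle a b := by
  unfold befLex at h; unfold lexle
  simp at h
  omega

lemma befLex_false {a b : Int × Int} (h : befLex a b = false) : lexle b a := by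
  unfold befLex at h; unfold lexle
  simp at h
  omega

lemma lexle_trans {a b c : Int × Int} (h1 : lexle a b) (h2 : lexle b c) : lexle a c := by
  unfold lexle at *; omega

lemma insertBy_lex_pairwise (x : Int × Int) (l : List (Int × Int)) (h : l.Pairwise lexle) :
    (PySem.List.insertBy befLex x l).Pairwise lexle := by
  induction l with
  | nil => simp [PySem.List.insertBy]
  | cons y ys ih =>
    rw [List.pairwise_cons] at h
    show (if befLex x y = true then x :: y :: ys else y :: PySem.List.insertBy befLex x ys).Pairwise lexle
    split_ifs with hb
    · refine List.pairwise_cons.mpr ⟨?_, List.pairwise_cons.mpr ⟨h.1, h.2⟩⟩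
      intro z hz
      rcases List.mem_cons.mp hz with rfl | hz
      · exact befLex_true hb
      · exact lexle_trans (befLex_true hb) (h.1 z hz)
    · refine List.pairwise_cons.mpr ⟨?_, ih h.2⟩
      intro z hz
      rcases (PySem.List.mem_insertBy _ _ _ _).mp hz with rfl | hz
      · exact befLex_false (by simpa using hb)
      · exact h.1 z hz

lemma sorted2_lex_pairwise (xs : List (Int × Int)) :
    (PySem.List.sorted2 xs Prod.fst Prod.snd false).Pairwise lexle := by
  show (xs.foldl (fun acc x => PySem.List.insertBy befLex x acc) []).Pairwise lexle
  have : ∀ (acc : List (Int × Int)), acc.Pairwise lexle →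
      (xs.foldl (fun acc x => PySem.List.insertBy befLex x acc) acc).Pairwise lexle := by
    induction xs with
    | nil => intro acc h; simpa using h
    | cons x t ih =>
      intro acc h
      exact ih _ (insertBy_lex_pairwise x acc h)
  exact this [] (by simp)

lemma sorted2_eq_of_perm_of_pairwise_lexlt (xs ys : List (Int × Int))
    (hperm : ys.Perm xs) (hys : ys.Pairwise lexlt) :
    PySem.List.sorted2 xs Prod.fst Prod.snd false = ys := by
  refine List.Perm.eq_of_pairwise (le := lexle) ?_
    (sorted2_lex_pairwise xs) (hys.imp (fun {a b} h => by unfold lexlt lexle at *; omega))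
    ((PySem.List.sorted2_perm xs Prod.fst Prod.snd false).trans hperm.symm)
  intro a b _ _ h1 h2
  unfold lexle at h1 h2
  exact Prod.ext_iff.mpr ⟨by omega, by omega⟩

-- ---------- the ranked tuples B sorts, and their closed-form sorted order ----------
def rankfn (p : Int × String) : Int × Int :=
  ((((PySem.List.index? priorityB p.2).getD 0 : Nat) : Int), p.1)

def rankedIn (xs : List String) : List (Int × Int) :=
  ((Pfun xs).filter (fun p => displayB.contains p.2)).map rankfn

lemma mem_priorityB_of_contains {e : String} (h : displayB.contains e = true) : e ∈ priorityB := by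
  have := (PySem.Dict.contains_iff_mem_keys displayB e).mp h
  simpa [displayB, PySem.Dict.keys, priorityB] using this

lemma rank_lt_five {e : String} (h : e ∈ priorityB) :
    (0 : Int) ≤ (((PySem.List.index? priorityB e).getD 0 : Nat) : Int) ∧
    (((PySem.List.index? priorityB e).getD 0 : Nat) : Int) < 5 := by
  simp [priorityB] at h
  rcases h with rfl | rfl | rfl | rfl | rfl <;> constructor <;> decide

-- partitioning a list by its (exhaustive, duplicate-free) first components is a permutation
lemma flatMap_filter_cons_perm (rs : List Int) (q : Int × Int) (t : List (Int × Int))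
    (hnd : rs.Nodup) (hq : q.1 ∈ rs) :
    (rs.flatMap (fun r => (q :: t).filter (fun x => x.1 == r))).Perm
      (q :: rs.flatMap (fun r => t.filter (fun x => x.1 == r))) := by
  induction rs with
  | nil => simp at hq
  | cons r rs' ih =>
    simp only [List.flatMap_cons]
    by_cases hqr : q.1 = r
    · have hq' : q.1 ∉ rs' := by
        rw [hqr]; exact (List.nodup_cons.mp hnd).1
      have hsame : rs'.flatMap (fun r => (q :: t).filter (fun x => x.1 == r))
          = rs'.flatMap (fun r => t.filter (fun x => x.1 == r)) := by
        apply List.flatMap_congr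
        intro r' hr'
        have : (q.1 == r') = false := by
          simp; intro h; exact hq' (h ▸ hr')
        simp [this]
      rw [hsame]
      have : (q :: t).filter (fun x => x.1 == r) = q :: t.filter (fun x => x.1 == r) := by
        simp [hqr]
      rw [this]
      simp
    · have : (q :: t).filter (fun x => x.1 == r) = t.filter (fun x => x.1 == r) := by
        simp [hqr]
      rw [this]
      have hq' : q.1 ∈ rs' := by
        rcases List.mem_cons.mp hq with h | h
        · exact absurd h hqr
        · exact h
      exact (List.Perm.append_left _ (ih (List.nodup_cons.mp hnd).2 hq')).trans List.perm_middle

lemma flatMap_filter_perm (rs : List Int) (l : List (Int × Int))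
    (hnd : rs.Nodup) (hall : ∀ q ∈ l, q.1 ∈ rs) :
    (rs.flatMap (fun r => l.filter (fun x => x.1 == r))).Perm l := by
  induction l with
  | nil => simp
  | cons q t ih =>
    refine (flatMap_filter_cons_perm rs q t hnd (hall q (by simp))).trans ?_
    exact (ih (fun x hx => hall x (by simp [hx]))).cons q

def ranksL : List Int := [0, 1, 2, 3, 4]

def groupsOf (xs : List String) : List (Int × Int) :=
  ranksL.flatMap (fun r => (rankedIn xs).filter (fun x => x.1 == r))

lemma rankedIn_snd_pairwise (xs : List String) :
    (rankedIn xs).Pairwise (fun a b => a.2 < b.2) := by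
  unfold rankedIn
  rw [List.pairwise_map]
  exact ((Pfun_pairwise xs).filter _).imp (fun {p q} h => h)

lemma mem_rankedIn_rank {xs : List String} {q : Int × Int} (hq : q ∈ rankedIn xs) :
    0 ≤ q.1 ∧ q.1 < 5 := by
  unfold rankedIn at hq
  rcases List.mem_map.mp hq with ⟨p, hp, rfl⟩
  have hc := (List.mem_filter.mp hp).2
  exact rank_lt_five (mem_priorityB_of_contains hc)

lemma rankedS_eq (xs : List String) :
    PySem.List.sorted2 (rankedIn xs) Prod.fst Prod.snd false = groupsOf xs := by
  apply sorted2_eq_of_perm_of_pairwise_lexlt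
  · exact flatMap_filter_perm ranksL (rankedIn xs) (by decide)
      (fun q hq => by
        have := mem_rankedIn_rank hq
        simp [ranksL]
        omega)
  · unfold groupsOf
    rw [List.pairwise_flatMap]
    constructor
    · intro r _
      refine ((rankedIn_snd_pairwise xs).filter _).imp_of_mem (fun {a b} ha hb h2 => ?_)
      have ha1 : a.1 = r := by simpa using (List.mem_filter.mp ha).2
      have hb1 : b.1 = r := by simpa using (List.mem_filter.mp hb).2
      exact Or.inr ⟨by omega, h2⟩
    · have hlt : ranksL.Pairwise (· < ·) := by decide
      refine hlt.imp_of_mem (fun {r r'} _ _ hrr => ?_)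
      intro x hx y hy
      have hx1 : x.1 = r := by simpa using (List.mem_filter.mp hx).2
      have hy1 : y.1 = r' := by simpa using (List.mem_filter.mp hy).2
      exact Or.inl (by omega)

-- ---------- B's final scan over the sorted tuples ----------
def stepScan (st : List String × Int) (q : Int × Int) : List String × Int :=
  if q.1 ≠ st.2 then (st.1 ++ [pyChr (65 + q.2).toNat], q.1) else st

lemma scan_const_rank (g : List (Int × Int)) (r : Int) (hg : ∀ q ∈ g, q.1 = r)
    (cs : List String) : g.foldl stepScan (cs, r) = (cs, r) := by
  induction g with
  | nil => rfl
  | cons q t ih =>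
    have hq : q.1 = r := hg q (by simp)
    simp only [List.foldl_cons, stepScan, hq, ne_eq, not_true_eq_false, if_false]
    exact ih (fun x hx => hg x (by simp [hx]))

lemma scan_groups (rs : List Int) (f : Int → List (Int × Int)) :
    ∀ (cs : List String) (prev : Int),
      (∀ r ∈ rs, ∀ q ∈ f r, q.1 = r) → (∀ r ∈ rs, prev < r) → rs.Pairwise (· < ·) →
      ((rs.flatMap f).foldl stepScan (cs, prev)).1
        = cs ++ rs.filterMap (fun r => ((f r).head?).map (fun q => pyChr (65 + q.2).toNat)) := by
  induction rs with
  | nil => intro cs prev _ _ _; simp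
  | cons r rest ih =>
    intro cs prev hg hlt hpw
    rw [List.flatMap_cons, List.foldl_append]
    cases hfr : f r with
    | nil =>
      simp only [hfr, List.foldl_nil, List.filterMap_cons, List.head?_nil, Option.map_none]
      exact ih cs prev (fun r' hr' => hg r' (by simp [hr'])) (fun r' hr' => hlt r' (by simp [hr']))
        (List.pairwise_cons.mp hpw).2
    | cons q g =>
      have hq : q.1 = r := hg r (by simp) q (by simp [hfr])
      have hprev : prev ≠ r := by have := hlt r (by simp); omega
      have h1 : (q :: g).foldl stepScan (cs, prev)
          = (cs ++ [pyChr (65 + q.2).toNat], r) := by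
        rw [List.foldl_cons]
        have : stepScan (cs, prev) q = (cs ++ [pyChr (65 + q.2).toNat], r) := by
          simp only [stepScan, hq]
          rw [if_pos (by simpa using fun h => hprev h.symm)]
        rw [this]
        exact scan_const_rank g r (fun x hx => hg r (by simp) x (by simp [hfr, hx])) _
      rw [h1]
      rw [ih _ r (fun r' hr' => hg r' (by simp [hr'])) (fun r' hr' => by
            have := (List.pairwise_cons.mp hpw).1 r' hr'; omega)
          (List.pairwise_cons.mp hpw).2]
      simp [hfr]

-- ---------- top-level reductions of the two ports ----------
lemma portB_eq (xs : List String) :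
    sort_priority_alt xs = ((d2B xs).items,
      PySem.Str.join ""
        ((PySem.List.sorted2 (rankedIn xs) Prod.fst Prod.snd false).foldl stepScan ([], -1)).1) := rfl

lemma portA_eq (xs : List String) :
    sort_priority xs = ((d2B xs).items,
      (["fire", "destroyed_buildings", "human_aid_rehabilitation", "military_vehicles", "combat",
        "empty"] : List String).foldl
        (fun acc l => acc ++ innerLoopA (dA xs) l (dA xs).keys) "") := by
  unfold sort_priority
  rw [show (PySem.List.pyRange 0 (PySem.List.len xs) 1).foldl
      (fun (st : PySem.Dict String String × PySem.Dict String String) i =>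
        if PySem.List.pyGetD xs i "" ≠ "empty" then
          (st.1.insert (pyChr (65 + i).toNat) (PySem.List.pyGetD xs i ""),
           if PySem.List.pyGetD xs i "" = "fire" then
             st.2.insert (pyChr (65 + i).toNat) "Fire"
           else if PySem.List.pyGetD xs i "" = "destroyed_buildings" then
             st.2.insert (pyChr (65 + i).toNat) "Destroyed buildings"
           else if PySem.List.pyGetD xs i "" = "human_aid_rehabilitation" then
             st.2.insert (pyChr (65 + i).toNat) "Humanitarian Aid and rehabilitation"
           else if PySem.List.pyGetD xs i "" = "military_vehicles" then
             st.2.insert (pyChr (65 + i).toNat) "Military Vehicles"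
           else if PySem.List.pyGetD xs i "" = "combat" then
             st.2.insert (pyChr (65 + i).toNat) "Combat"
           else st.2)
        else st)
      (PySem.Dict.empty, PySem.Dict.empty)
      = (PySem.List.enumerate xs).foldl stepA (PySem.Dict.empty, PySem.Dict.empty) from by
    rw [PySem.List.enumerate_eq_map_pyRange xs "", List.foldl_map]
    rfl]
  rw [foldA_eq]

-- ---------- A's inner loop computes the key of the first dict entry carrying value i ----------
lemma innerLoopA_none (d : PySem.Dict String String) (i : String) (ks : List String)
    (h : ∀ j ∈ ks, i ≠ d.getD j "") : innerLoopA d i ks = "" := by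
  induction ks with
  | nil => rfl
  | cons j rest ih =>
    rw [innerLoopA, if_neg (h j (by simp))]
    exact ih (fun x hx => h x (by simp [hx]))

lemma innerLoopA_hit (d : PySem.Dict String String) (i : String) (ks : List String)
    (h : ∃ j ∈ ks, i = d.getD j "") :
    innerLoopA d i ks =
      (match PySem.List.index? d.values i with
       | some idx => PySem.List.pyGetD d.keys (idx : Int) ""
       | none => "") := by
  induction ks with
  | nil => simp at h
  | cons j rest ih =>
    by_cases hj : i = d.getD j ""
    · rw [innerLoopA, if_pos hj]
    · rw [innerLoopA, if_neg hj]
      rcases h with ⟨x, hx, hxe⟩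
      rcases List.mem_cons.mp hx with rfl | hx'
      · exact absurd hxe hj
      · exact ih ⟨x, hx', hxe⟩

lemma innerLoopA_eq (d : PySem.Dict String String) (i : String) (hnd : d.keys.Nodup) :
    innerLoopA d i d.keys = ((d.items.find? (fun q => q.2 == i)).map (·.1)).getD "" := by
  by_cases hmem : i ∈ d.values
  · have hsome : (PySem.List.index? d.values i).isSome := (PySem.List.index?_isSome_iff _ _).mpr hmem
    obtain ⟨idx, hidx⟩ := Option.isSome_iff_exists.mp hsome
    obtain ⟨hk, hval, hfirst⟩ := PySem.List.getElem_of_index?_eq_some hidx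
    have hlen : d.items.length = d.values.length := by simp [PySem.Dict.values]
    have hklen : d.keys.length = d.items.length := by simp [PySem.Dict.keys]
    have hitem : d.items[idx]'(by omega) = (d.keys[idx]'(by omega), d.values[idx]'(by omega)) := by
      simp [PySem.Dict.keys, PySem.Dict.values]
    have hfind : d.items.find? (fun q => q.2 == i) = some (d.items[idx]'(by omega)) := by
      rw [List.find?_eq_some_iff_getElem]
      refine ⟨by simp [hitem, hval], idx, by omega, rfl, ?_⟩
      intro j hj
      have : d.items[j]'(by omega) = (d.keys[j]'(by omega), d.values[j]'(by omega)) := by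
        simp [PySem.Dict.keys, PySem.Dict.values]
      simp [this]
      exact hfirst j hj
    have hmemitem : (d.keys[idx]'(by omega), d.values[idx]'(by omega)) ∈ d.items := by
      rw [← hitem]; exact List.getElem_mem _
    have hgetD : d.getD (d.keys[idx]'(by omega)) "" = i := by
      have := PySem.Dict.get?_of_mem_items d hmemitem hnd
      simp [PySem.Dict.getD, this, hval]
    have hhit : ∃ j ∈ d.keys, i = d.getD j "" :=
      ⟨d.keys[idx]'(by omega), List.getElem_mem _, hgetD.symm⟩
    rw [innerLoopA_hit d i d.keys hhit, hidx, hfind]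
    simp [hitem, PySem.List.pyGetD_natCast, List.getD, List.getElem?_eq_getElem (by omega : idx < d.keys.length)]
  · have hnone : ∀ j ∈ d.keys, i ≠ d.getD j "" := by
      intro j hj he
      rcases List.mem_map.mp hj with ⟨q, hq, rfl⟩
      have hget := PySem.Dict.get?_of_mem_items d (k := q.1) (v := q.2) (by simpa using hq) hnd
      have hg : d.getD q.1 "" = q.2 := by simp [PySem.Dict.getD, hget]
      apply hmem
      rw [he, hg]
      simp only [PySem.Dict.values]
      exact List.mem_map.mpr ⟨q, hq, rfl⟩
    rw [innerLoopA_none d i d.keys hnone]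
    have : d.items.find? (fun q => q.2 == i) = none := by
      rw [List.find?_eq_none]
      intro q hq
      simp
      intro he
      exact hmem (by simp only [PySem.Dict.values]; exact List.mem_map.mpr ⟨q, hq, he⟩)
    simp [this]

-- dA's keys and first-match characterisation
lemma dA_keys (xs : List String) : (dA xs).keys = (Pfun xs).map pkey := by
  simp [dA, PySem.Dict.keys, List.map_map]

lemma dA_keys_nodup (xs : List String) : (dA xs).keys.Nodup := by
  rw [dA_keys]; exact Pfun_key_nodup xs

lemma firstA_eq (xs : List String) (l : String) :
    innerLoopA (dA xs) l (dA xs).keys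
      = (((Pfun xs).find? (fun p => p.2 == l)).map pkey).getD "" := by
  rw [innerLoopA_eq _ _ (dA_keys_nodup xs)]
  show ((((Pfun xs).map (fun p => (pkey p, p.2))).find? (fun q => q.2 == l)).map (·.1)).getD "" = _
  rw [List.find?_map]
  rw [Option.map_map]
  rfl

-- ---------- ''.join over an empty separator is string concatenation ----------
lemma join_empty_cons (x : String) (t : List String) :
    PySem.Str.join "" (x :: t) = x ++ PySem.Str.join "" t := by
  apply String.toList_inj.mp
  rw [String.toList_append, PySem.Str.toList_join, PySem.Str.toList_join]
  cases t with
  | nil => simp [PySem.Chars.join_singleton, PySem.Chars.join_nil]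
  | cons y t' =>
    simp only [List.map_cons]
    rw [show ("" : String).toList = [] from rfl, PySem.Chars.join_cons_cons]
    simp

lemma join_empty_eq_foldl (l : List String) :
    PySem.Str.join "" l = l.foldl (· ++ ·) "" := by
  have key : ∀ (l : List String) (s : String), l.foldl (· ++ ·) s = s ++ PySem.Str.join "" l := by
    intro l
    induction l with
    | nil =>
      intro s
      apply String.toList_inj.mp
      rw [String.toList_append, PySem.Str.toList_join]
      simp [PySem.Chars.join_nil]
    | cons x t ih =>
      intro s
      rw [List.foldl_cons, ih, join_empty_cons, ← String.append_assoc]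
  rw [key]
  apply String.toList_inj.mp
  rw [String.toList_append]
  simp

-- folding '+=' of option-defaults equals the filterMap list
lemma foldl_append_getD {α : Type} (g : α → Option String) (ls : List α) (acc : String) :
    ls.foldl (fun acc i => acc ++ (g i).getD "") acc = (ls.filterMap g).foldl (· ++ ·) acc := by
  induction ls generalizing acc with
  | nil => rfl
  | cons x t ih =>
    cases hx : g x
    · rw [List.foldl_cons, List.filterMap_cons, hx]
      simp only [Option.getD_none]
      rw [show acc ++ "" = acc from by apply String.toList_inj.mp; simp]
      exact ih acc
    · simp [hx, ih]

-- ---------- each rank group is the first-occurrence list of one label ----------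
lemma group_eq (xs : List String) (r : Int) (lbl : String) (hlbl : lbl ∈ priorityB)
    (h : ∀ e ∈ priorityB,
      (displayB.contains e && ((((PySem.List.index? priorityB e).getD 0 : Nat) : Int) == r))
        = (e == lbl)) :
    (rankedIn xs).filter (fun x => x.1 == r)
      = ((Pfun xs).filter (fun p => p.2 == lbl)).map rankfn := by
  unfold rankedIn
  rw [List.filter_map]
  rw [List.filter_filter]
  congr 1
  apply List.filter_congr
  intro p _
  show (((((PySem.List.index? priorityB p.2).getD 0 : Nat) : Int) == r) && displayB.contains p.2)
      = (p.2 == lbl)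
  rw [Bool.and_comm]
  by_cases he : p.2 ∈ priorityB
  · exact h p.2 he
  · have hc : displayB.contains p.2 = false := by
      rcases hb : displayB.contains p.2 with _ | _
      · rfl
      · exact absurd (mem_priorityB_of_contains hb) he
    have hne : (p.2 == lbl) = false := by
      rcases hb : p.2 == lbl with _ | _
      · rfl
      · exact absurd ((beq_iff_eq).mp hb ▸ hlbl) he
    rw [hc, hne, Bool.false_and]

-- first-occurrence option for a label
def firstOcc (xs : List String) (l : String) : Option String :=
  ((Pfun xs).find? (fun p => p.2 == l)).map pkey

lemma firstOcc_empty (xs : List String) : firstOcc xs "empty" = none := by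
  unfold firstOcc
  rw [List.find?_eq_none.mpr]
  · rfl
  · intro p hp
    have := (List.mem_filter.mp hp).2
    simpa using this

lemma entry_eq (xs : List String) (r : Int) (lbl : String) (hlbl : lbl ∈ priorityB)
    (h : ∀ e ∈ priorityB,
      (displayB.contains e && ((((PySem.List.index? priorityB e).getD 0 : Nat) : Int) == r))
        = (e == lbl)) :
    (((rankedIn xs).filter (fun x => x.1 == r)).head?).map (fun q => pyChr (65 + q.2).toNat)
      = firstOcc xs lbl := by
  rw [group_eq xs r lbl hlbl h, List.head?_map, List.head?_filter, Option.map_map]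
  rfl

lemma portA_eq_portB : ∀ (xs : List String), sort_priority xs = sort_priority_alt xs := by
  intro xs
  rw [portA_eq, portB_eq, rankedS_eq]
  refine Prod.ext rfl ?_
  show _ = PySem.Str.join "" ((groupsOf xs).foldl stepScan ([], -1)).1
  -- B's side: the scan over the sorted groups emits one first-occurrence letter per rank
  rw [show (groupsOf xs).foldl stepScan ([], -1)
      = (ranksL.flatMap (fun r => (rankedIn xs).filter (fun x => x.1 == r))).foldl stepScan ([], -1) from rfl]
  have hscan := scan_groups ranksL (fun r => (rankedIn xs).filter (fun x => x.1 == r)) [] (-1)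
    (fun r _ q hq => by simpa using (List.mem_filter.mp hq).2)
    (fun r hr => by simp [ranksL] at hr; omega)
    (by decide)
  -- the five rank groups are the five labels' first occurrences
  have e0 := entry_eq xs 0 "fire" (by decide) (by decide)
  have e1 := entry_eq xs 1 "destroyed_buildings" (by decide) (by decide)
  have e2 := entry_eq xs 2 "human_aid_rehabilitation" (by decide) (by decide)
  have e3 := entry_eq xs 3 "military_vehicles" (by decide) (by decide)
  have e4 := entry_eq xs 4 "combat" (by decide) (by decide)
  -- A's side: the per-priority loop appends exactly those first occurrences
  have hfold : (["fire", "destroyed_buildings", "human_aid_rehabilitation", "military_vehicles",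
      "combat", "empty"] : List String).foldl
        (fun acc l => acc ++ innerLoopA (dA xs) l (dA xs).keys) ""
      = (["fire", "destroyed_buildings", "human_aid_rehabilitation", "military_vehicles",
      "combat", "empty"] : List String).foldl
        (fun acc l => acc ++ (firstOcc xs l).getD "") "" := by
    apply PySem.List.foldl_congr_mem
    intro acc l _
    rw [firstA_eq]
    rfl
  rw [hfold, foldl_append_getD, hscan, join_empty_eq_foldl]
  simp only [ranksL, List.filterMap_cons, List.filterMap_nil, e0, e1, e2, e3, e4,
    List.nil_append, firstOcc_empty]

-- ===== VERDICT (by name: the statement is the Claim_ definition above) =====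
theorem sort_priority_spec : Claim_equal_sort_priority := by
  intro xs _
  unfold Spec_sort_priority
  exact portA_eq_portB xs
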